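-- pv_equiv track=rewrite | github.com/beholder91/USYD | 9001/moderator.py | is_valid_line
-- ===== SOURCE A (Python) =====
-- def is_valid_line(line):
--     i = 0
--     while i < len(line):
--         if line[i] == ",":
--             if i == 0:
--                 return False  # comma is the first character
--             elif i == len(line) - 1:  # doesn't contain comma
--                 return False
--         i += 1
--     if i == len(line):
--         if line[-1] == "\n":  # the last char must be \n
--             return True
-- ===== SOURCE B (Python) =====
-- def is_valid_line(line):
--     if line[0] == ",":
--         return False
--     if line[-1] == ",":
--         return False
--     if line[-1] == "\n":
--         return True
--     return None
-- ===== Notes on version B (the rewrite author's own statement) =====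
-- stated objective: faster
-- what changed: Replaces A's O(n) character scan (whose comma test only ever fires at index 0 or len-1) with O(1) inspection of the first and last characters.
import Mathlib
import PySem

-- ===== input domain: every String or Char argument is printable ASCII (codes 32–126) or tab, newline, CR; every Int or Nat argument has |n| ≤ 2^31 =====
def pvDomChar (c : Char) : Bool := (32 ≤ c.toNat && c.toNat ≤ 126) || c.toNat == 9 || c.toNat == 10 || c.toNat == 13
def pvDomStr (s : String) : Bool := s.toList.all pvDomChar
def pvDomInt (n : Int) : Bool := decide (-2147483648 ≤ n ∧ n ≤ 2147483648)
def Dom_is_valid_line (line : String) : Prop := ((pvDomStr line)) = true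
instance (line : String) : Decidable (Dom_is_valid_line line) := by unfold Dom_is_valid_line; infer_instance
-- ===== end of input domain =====

-- B replaces A's O(n) character scan with O(1) first/last-character checks; both raise on "" (excluded by Pre_).

-- ===== PORT A =====
-- the while loop: i scans 0..len-1; returns some false on a comma at index 0 or len-1; none = fell through
def isValidLineLoopA (cs : List Char) (i : Nat) : Option Bool :=
  if h : i < cs.length then
    if cs[i] = ',' then
      if i = 0 then some false
      else if i = cs.length - 1 then some false
      else isValidLineLoopA cs (i + 1)
    else isValidLineLoopA cs (i + 1)
  else none
termination_by cs.length - i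

def is_valid_line (line : String) : Option Bool :=
  let cs := line.toList
  match isValidLineLoopA cs 0 with
  | some b => some b
  | none =>
    match PySem.List.pyGet? cs (-1) with      -- line[-1]
    | some c => if c = '\n' then some true else none
    | none => none                            -- IndexError on empty line; excluded by Pre_

-- ===== PORT B =====
def is_valid_line_alt (line : String) : Option Bool :=
  let cs := line.toList
  match PySem.List.pyGet? cs 0 with           -- line[0]
  | none => none                              -- IndexError on empty line; excluded by Pre_
  | some c0 =>
    if c0 = ',' then some false
    else
      match PySem.List.pyGet? cs (-1) with    -- line[-1]
      | none => none
      | some cl =>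
        if cl = ',' then some false
        else if cl = '\n' then some true
        else none

-- ===== PRECONDITION & SPEC =====
-- Pre_ excludes the empty string, on which A (and B) raise IndexError at line[-1] (resp. line[0]).
def Pre_is_valid_line (line : String) : Prop := line.toList ≠ []
instance (line : String) : Decidable (Pre_is_valid_line line) := by unfold Pre_is_valid_line; infer_instance
def pvWitness_is_valid_line : String := "ab\n"

def Spec_is_valid_line (line : String) (out : Option Bool) : Prop := out = is_valid_line_alt line
instance (line : String) (out : Option Bool) : Decidable (Spec_is_valid_line line out) := by unfold Spec_is_valid_line; infer_instance

-- ===== CLAIM (what is proved, stated in full; the proofs are below) =====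
def Claim_equal_is_valid_line : Prop := ∀ (line : String), Dom_is_valid_line line → Pre_is_valid_line line → Spec_is_valid_line line (is_valid_line line)

-- ===== LEMMAS AND PROOFS =====

-- for i ≥ 1 the loop returns some false iff it still has characters to scan and the last one is a comma
theorem isValidLineLoopA_pos (cs : List Char) (i : Nat) (h0 : 0 < i) :
    isValidLineLoopA cs i =
      if i < cs.length ∧ cs.getLast? = some ',' then some false else none := by
  generalize hn : cs.length - i = n
  induction n generalizing i with
  | zero =>
    have hge : ¬ i < cs.length := by omega
    unfold isValidLineLoopA
    simp [hge]
  | succ n ih =>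
    have hlt : i < cs.length := by omega
    unfold isValidLineLoopA
    rw [dif_pos hlt]
    have hlast : cs.getLast? = cs[cs.length - 1]? := List.getLast?_eq_getElem?
    by_cases hc : cs[i] = ','
    · rw [if_pos hc, if_neg (by omega : ¬ i = 0)]
      by_cases hl : i = cs.length - 1
      · rw [if_pos hl]
        have : cs.getLast? = some ',' := by
          rw [hlast, ← hl]
          simp [List.getElem?_eq_getElem hlt, hc]
        simp [hlt, this]
      · rw [if_neg hl]
        rw [ih (i + 1) (by omega) (by omega)]
        have h1 : i + 1 < cs.length := by omega
        simp [hlt, h1]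
    · rw [if_neg hc]
      rw [ih (i + 1) (by omega) (by omega)]
      by_cases h1 : i + 1 < cs.length
      · simp [hlt, h1]
      · have hl : i = cs.length - 1 := by omega
        have : cs.getLast? ≠ some ',' := by
          rw [hlast, ← hl]
          simp [List.getElem?_eq_getElem hlt]
          exact hc
        simp [hlt, h1, this]

-- ===== VERDICT (by name: the statement is the Claim_ definition above) =====
theorem is_valid_line_spec : Claim_equal_is_valid_line := by
  intro line _ hpre
  unfold Spec_is_valid_line is_valid_line is_valid_line_alt
  cases hcs : line.toList with
  | nil => exact absurd hcs hpre
  | cons c rest =>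
    simp only [hcs]
    unfold isValidLineLoopA
    have hlt : 0 < (c :: rest).length := by simp
    rw [dif_pos hlt]
    simp only [List.getElem_cons_zero, PySem.List.pyGet?_zero_cons]
    by_cases hc : c = ','
    · simp [hc]
    · rw [if_neg hc, if_neg hc]
      rw [isValidLineLoopA_pos (c :: rest) 1 (by omega)]
      rw [PySem.List.pyGet?_neg_one]
      cases rest with
      | nil => simp [hc]
      | cons d ds =>
        have h1 : 1 < (c :: d :: ds).length := by simp
        rw [List.getLast?_cons_cons]
        cases hgl : (d :: ds).getLast? with
        | none => simp [List.getLast?_eq_none_iff] at hgl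
        | some l =>
          by_cases hl : l = ','
          · simp [hl]
          · simp [hl]
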